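-- pv_equiv track=rewrite | github.com/tristanang/comp211 | lab5.7.py | exactly_k
-- ===== SOURCE A (Python) =====
-- def exactly_k(string,ch,k):
--     '''Returns True if the character ch appears exactly k times in string'''
--     if string == '' and k==0:
--         return True
--     elif string == '' and k!=0:
--         return False
--     elif string[0] == ch:
--         return exactly_k(string[1:],ch,k-1)
--     else:
--         return exactly_k(string[1:],ch,k)
-- ===== SOURCE B (Python) =====
-- def exactly_k(string, ch, k):
--     '''Returns True if the character ch appears exactly k times in string'''
--     count = 0
--     for c in string:
--         if c == ch:
--             count += 1
--     return count == k
-- ===== Notes on version B (the rewrite author's own statement) =====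
-- stated objective: faster
-- what changed: Replaces recursion over string slices (each step copies string[1:] and decrements k) with a single iterative pass that accumulates a count and compares it to k once at the end.
import Mathlib
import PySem

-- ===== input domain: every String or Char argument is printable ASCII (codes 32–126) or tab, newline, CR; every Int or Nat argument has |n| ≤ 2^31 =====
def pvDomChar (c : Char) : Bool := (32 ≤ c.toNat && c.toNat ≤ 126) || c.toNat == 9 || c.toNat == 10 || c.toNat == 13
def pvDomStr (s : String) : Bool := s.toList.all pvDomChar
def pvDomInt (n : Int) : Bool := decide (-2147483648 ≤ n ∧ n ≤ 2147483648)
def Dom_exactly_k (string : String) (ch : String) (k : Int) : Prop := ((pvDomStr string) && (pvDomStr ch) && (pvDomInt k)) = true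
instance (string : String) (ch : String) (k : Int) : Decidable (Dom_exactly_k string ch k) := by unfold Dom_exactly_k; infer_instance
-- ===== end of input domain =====

-- B replaces A's slice-copying recursion (which decrements k) by one iterative counting pass compared to k at the end; avoids per-step slice copies (objective: faster, measured).

-- ===== PORT A =====
-- A recurses on string[1:], comparing the one-character string string[0] to ch and decrementing k on a match.
def exactlyKRecA (l : List Char) (ch : String) (k : Int) : Bool :=
  match l with
  | [] => if k == 0 then true else false
  | c :: rest => if String.mk [c] == ch then exactlyKRecA rest ch (k - 1) else exactlyKRecA rest ch k

def exactly_k (string : String) (ch : String) (k : Int) : Bool :=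
  exactlyKRecA string.toList ch k

-- ===== PORT B =====
-- One pass: count matches with a fold (Python's for-loop accumulator), then compare the count to k.
def exactly_k_alt (string : String) (ch : String) (k : Int) : Bool :=
  (string.toList.foldl (fun count c => if String.mk [c] == ch then count + 1 else count) (0 : Int)) == k

-- ===== PRECONDITION & SPEC =====
def Spec_exactly_k (string : String) (ch : String) (k : Int) (out : Bool) : Prop := out = exactly_k_alt string ch k
instance (string : String) (ch : String) (k : Int) (out : Bool) : Decidable (Spec_exactly_k string ch k out) := by unfold Spec_exactly_k; infer_instance

-- ===== CLAIM (what is proved, stated in full; the proofs are below) =====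
def Claim_equal_exactly_k : Prop := ∀ (string : String) (ch : String) (k : Int), Dom_exactly_k string ch k → Spec_exactly_k string ch k (exactly_k string ch k)

-- ===== LEMMAS AND PROOFS =====

theorem foldl_count_shift (ch : String) (l : List Char) (a : Int) :
    l.foldl (fun count c => if String.mk [c] == ch then count + 1 else count) a
      = a + l.foldl (fun count c => if String.mk [c] == ch then count + 1 else count) 0 := by
  induction l generalizing a with
  | nil => simp
  | cons c rest ih =>
    simp only [List.foldl_cons]
    rw [ih, ih (if String.mk [c] == ch then (0:Int) + 1 else 0)]
    split <;> omega

theorem recA_eq_count (ch : String) (l : List Char) (k : Int) :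
    exactlyKRecA l ch k
      = (l.foldl (fun count c => if String.mk [c] == ch then count + 1 else count) (0 : Int) == k) := by
  induction l generalizing k with
  | nil =>
    simp only [exactlyKRecA, List.foldl_nil]
    rcases eq_or_ne k 0 with h | h
    · subst h; decide
    · rw [if_neg (by simpa using h)]
      exact (beq_eq_false_iff_ne.mpr (Ne.symm h)).symm
  | cons c rest ih =>
    simp only [exactlyKRecA, List.foldl_cons]
    rw [foldl_count_shift]
    split
    · rw [ih (k - 1), Bool.eq_iff_iff]; simp only [beq_iff_eq]; omega
    · rw [ih k, Bool.eq_iff_iff]; simp only [beq_iff_eq]; omega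

-- ===== VERDICT (by name: the statement is the Claim_ definition above) =====
theorem exactly_k_spec : Claim_equal_exactly_k := by
  intro string ch k _
  unfold Spec_exactly_k exactly_k exactly_k_alt
  exact recA_eq_count ch string.toList k
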